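-- pv_equiv track=rewrite | github.com/polli-labs/linnaeus | tools/estimate_model_complexity.py | estimate_meta_head_params
-- ===== SOURCE A (Python) =====
-- from typing import Dict, List, Tuple, Any
--
-- def estimate_meta_head_params(meta_dims: List[int], rope_dims: List[int]) -> int:
--     """Estimate parameters for metadata heads."""
--     total_params = 0
--
--     for meta_dim in meta_dims:
--         if meta_dim > 0:
--             # For each RoPE stage (2 stages)
--             for rope_dim in rope_dims:
--                 # Linear + ReLU + LayerNorm + ResNormLayer
--                 linear = meta_dim * (rope_dim + 1)
--                 norm = 2 * rope_dim  # LayerNorm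
--                 res_norm = rope_dim  # ResNormLayer (approximately)
--                 total_params += linear + norm + res_norm
--
--     return total_params
-- ===== SOURCE B (Python) =====
-- def estimate_meta_head_params(meta_dims, rope_dims):
--     """Estimate parameters for metadata heads (closed-form, single pass)."""
--     s = sum(rope_dims)
--     r = len(rope_dims)
--     pos = [m for m in meta_dims if m > 0]
--     # per positive meta_dim: m*(s+r) + 3*s
--     return (s + r) * sum(pos) + 3 * s * len(pos)
-- ===== Notes on version B (the rewrite author's own statement) =====
-- stated objective: faster
-- what changed: Replaced the nested loop over meta_dims x rope_dims by a closed form using the sum and length of rope_dims and of the positive meta_dims.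
import Mathlib
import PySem

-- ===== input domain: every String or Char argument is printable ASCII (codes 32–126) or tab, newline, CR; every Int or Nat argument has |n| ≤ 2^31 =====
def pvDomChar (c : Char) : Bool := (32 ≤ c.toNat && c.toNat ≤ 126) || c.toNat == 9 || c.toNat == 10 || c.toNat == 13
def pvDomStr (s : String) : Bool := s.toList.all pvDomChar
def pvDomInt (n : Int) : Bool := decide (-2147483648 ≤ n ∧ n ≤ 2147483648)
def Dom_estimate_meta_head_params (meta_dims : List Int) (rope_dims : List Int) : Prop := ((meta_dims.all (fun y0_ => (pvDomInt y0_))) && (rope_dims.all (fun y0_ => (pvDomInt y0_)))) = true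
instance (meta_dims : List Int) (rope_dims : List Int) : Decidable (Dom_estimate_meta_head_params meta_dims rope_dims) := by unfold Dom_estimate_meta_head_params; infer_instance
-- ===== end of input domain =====

-- B replaces A's nested loops by a closed form from the sum/length of rope_dims and of the positive meta_dims (objective: faster).

-- ===== PORT A =====
-- nested accumulation, exactly A's loops: skip meta_dim ≤ 0, else fold over rope_dims
def estimate_meta_head_params (meta_dims : List Int) (rope_dims : List Int) : Int :=
  meta_dims.foldl
    (fun total meta_dim =>
      if meta_dim > 0 then
        rope_dims.foldl
          (fun acc rope_dim =>
            let linear := meta_dim * (rope_dim + 1)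
            let norm := 2 * rope_dim
            let res_norm := rope_dim
            acc + (linear + norm + res_norm)) total
      else total) 0

-- ===== PORT B =====
def estimate_meta_head_params_alt (meta_dims : List Int) (rope_dims : List Int) : Int :=
  let s := rope_dims.sum
  let r : Int := rope_dims.length
  let pos := meta_dims.filter (fun m => m > 0)
  (s + r) * pos.sum + 3 * s * (pos.length : Int)

-- ===== PRECONDITION & SPEC =====
def Spec_estimate_meta_head_params (meta_dims : List Int) (rope_dims : List Int) (out : Int) : Prop := out = estimate_meta_head_params_alt meta_dims rope_dims
instance (meta_dims : List Int) (rope_dims : List Int) (out : Int) : Decidable (Spec_estimate_meta_head_params meta_dims rope_dims out) := by unfold Spec_estimate_meta_head_params; infer_instance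

-- ===== CLAIM (what is proved, stated in full; the proofs are below) =====
def Claim_equal_estimate_meta_head_params : Prop := ∀ (meta_dims : List Int) (rope_dims : List Int), Dom_estimate_meta_head_params meta_dims rope_dims → Spec_estimate_meta_head_params meta_dims rope_dims (estimate_meta_head_params meta_dims rope_dims)

-- ===== LEMMAS AND PROOFS =====

-- inner loop of A in closed form
theorem inner_loop_closed (rope_dims : List Int) (m acc : Int) :
    rope_dims.foldl
      (fun acc rope_dim =>
        let linear := m * (rope_dim + 1)
        let norm := 2 * rope_dim
        let res_norm := rope_dim
        acc + (linear + norm + res_norm)) acc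
      = acc + m * (rope_dims.sum + rope_dims.length) + 3 * rope_dims.sum := by
  induction rope_dims generalizing acc with
  | nil => simp
  | cons x xs ih =>
    simp only [List.foldl_cons, List.sum_cons, List.length_cons, ih]
    push_cast
    ring

-- outer loop of A in closed form
theorem outer_loop_closed (meta_dims : List Int) (rope_dims : List Int) (t : Int) :
    meta_dims.foldl
      (fun total meta_dim =>
        if meta_dim > 0 then
          rope_dims.foldl
            (fun acc rope_dim =>
              let linear := meta_dim * (rope_dim + 1)
              let norm := 2 * rope_dim
              let res_norm := rope_dim
              acc + (linear + norm + res_norm)) total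
        else total) t
      = t + (rope_dims.sum + rope_dims.length) * (meta_dims.filter (fun m => m > 0)).sum
          + 3 * rope_dims.sum * ((meta_dims.filter (fun m => m > 0)).length : Int) := by
  induction meta_dims generalizing t with
  | nil => simp
  | cons m ms ih =>
    rw [List.foldl_cons]
    by_cases hm : m > 0
    · have hfc : (m :: ms).filter (fun x => x > 0) = m :: ms.filter (fun x => x > 0) := by
        simp [List.filter_cons, hm]
      rw [if_pos hm, inner_loop_closed, ih, hfc, List.sum_cons, List.length_cons]
      push_cast
      ring
    · have hfc : (m :: ms).filter (fun x => x > 0) = ms.filter (fun x => x > 0) := by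
        simp [List.filter_cons, hm]
      rw [if_neg hm, ih, hfc]

-- ===== VERDICT (by name: the statement is the Claim_ definition above) =====
theorem estimate_meta_head_params_spec : Claim_equal_estimate_meta_head_params := by
  intro meta_dims rope_dims _
  unfold Spec_estimate_meta_head_params estimate_meta_head_params estimate_meta_head_params_alt
  simp only [outer_loop_closed, zero_add]
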